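-- pv_equiv track=rewrite | github.com/as7cheng/ner-extract | short-ner.py | access_input
-- ===== SOURCE A (Python) =====
-- symbols = ["*", "-", "", "'"]
--
-- def access_input(input):
--     input_list = input.split(" ")
--     for symbol in symbols:
--         try:
--             input_list.remove(symbol)
--         except:
--             pass
--     return input_list
-- ===== SOURCE B (Python) =====
-- symbols = ["*", "-", "", "'"]
--
-- def access_input(input):
--     pending = set(symbols)
--     result = []
--     for token in input.split(" "):
--         if token in pending:
--             pending.discard(token)
--         else:
--             result.append(token)
--     return result
-- ===== Notes on version B (the rewrite author's own statement) =====
-- stated objective: simpler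
-- what changed: Instead of four separate list.remove scans (one per symbol, each wrapped in try/except), B makes a single pass over the split tokens with a pending-symbol set, skipping the first occurrence of each symbol and appending everything else to a result list.
import Mathlib
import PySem

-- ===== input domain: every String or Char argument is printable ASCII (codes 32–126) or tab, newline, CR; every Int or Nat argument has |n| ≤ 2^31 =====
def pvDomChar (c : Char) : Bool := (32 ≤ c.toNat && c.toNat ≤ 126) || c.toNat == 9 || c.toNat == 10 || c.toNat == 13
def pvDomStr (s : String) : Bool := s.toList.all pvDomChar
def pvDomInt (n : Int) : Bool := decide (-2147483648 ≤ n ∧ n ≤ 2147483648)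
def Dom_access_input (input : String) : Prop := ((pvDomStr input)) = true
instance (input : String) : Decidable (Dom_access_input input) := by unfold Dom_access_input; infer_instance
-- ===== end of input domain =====

-- B replaces A's four list.remove scans by one pass over the split list with a pending-symbol set (objective: simpler).

-- ===== PORT A =====
def symbols : List String := ["*", "-", "", "'"]

def access_input (input : String) : List String :=
  -- input_list = input.split(" "); for symbol in symbols: try remove except pass
  symbols.foldl
    (fun input_list symbol =>
      match PySem.List.remove? input_list symbol with
      | some l => l          -- remove succeeded
      | none => input_list)  -- ValueError swallowed by except: pass
    ((PySem.Str.split? input " ").getD [])  -- sep " " ≠ "": split? is always some; getD never fires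

-- ===== PORT B =====
def accessLoop : List String → PySem.Set String → List String → List String
  | [], _, result => result
  | token :: rest, pending, result =>
    if PySem.Set.contains pending token then
      accessLoop rest (PySem.Set.discard pending token) result
    else
      accessLoop rest pending (result ++ [token])

def access_input_alt (input : String) : List String :=
  accessLoop ((PySem.Str.split? input " ").getD []) (PySem.Set.ofList symbols) []

-- ===== PRECONDITION & SPEC =====
def Spec_access_input (input : String) (out : List String) : Prop := out = access_input_alt input
instance (input : String) (out : List String) : Decidable (Spec_access_input input out) := by unfold Spec_access_input; infer_instance

-- ===== CLAIM (what is proved, stated in full; the proofs are below) =====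
def Claim_equal_access_input : Prop := ∀ (input : String), Dom_access_input input → Spec_access_input input (access_input input)

-- ===== LEMMAS AND PROOFS =====

-- A's try-remove-except step is List.erase (remove first occurrence, no-op if absent).
theorem removeStep_eq_erase (xs : List String) (s : String) :
    (match PySem.List.remove? xs s with
     | some l => l
     | none => xs) = xs.erase s := by
  by_cases h : s ∈ xs
  · rw [PySem.List.remove?_eq_some_erase _ _ h]
  · rw [(PySem.List.remove?_eq_none_iff xs s).2 h]
    simp [List.erase_of_not_mem h]

-- Folding erase over an empty target list stays empty.
theorem foldl_erase_nil (S : List String) :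
    S.foldl (fun xs s => xs.erase s) [] = [] := by
  induction S with
  | nil => rfl
  | cons s rest ih => simpa using ih

-- Head step of the symbol-fold: erasing every symbol from x :: t either drops x
-- (consuming x from the symbol list) or keeps x in front.
theorem foldl_erase_cons (S : List String) (x : String) (t : List String) :
    S.foldl (fun xs s => xs.erase s) (x :: t) =
      if x ∈ S then (S.erase x).foldl (fun xs s => xs.erase s) t
      else x :: S.foldl (fun xs s => xs.erase s) t := by
  induction S generalizing t with
  | nil => simp
  | cons s rest ih =>
    by_cases hx : x = s
    · subst hx
      simp [List.foldl_cons, List.erase_cons_head]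
    · have hsx : ¬ s = x := fun h => hx h.symm
      have hse : (x :: t).erase s = x :: t.erase s := by simp [hx]
      rw [List.foldl_cons, hse, ih (t.erase s)]
      by_cases hr : x ∈ rest
      · rw [if_pos hr, if_pos (by simp [hr]), List.erase_cons, if_neg (by simp [hsx]),
          List.foldl_cons]
      · simp [hr, hx]

-- On a duplicate-free set, discard agrees with erase.
theorem discard_eq_erase (S : PySem.Set String) (hS : S.Nodup) (x : String) :
    PySem.Set.discard S x = S.erase x := by
  induction S with
  | nil => rfl
  | cons s rest ih =>
    rcases List.nodup_cons.1 hS with ⟨hs, hrest⟩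
    simp only [PySem.Set.discard] at ih ⊢
    by_cases hx : s = x
    · subst hx
      rw [List.erase_cons_head,
        show List.filter (fun y => !y == s) (s :: rest) = List.filter (fun y => !y == s) rest from
          by simp]
      exact List.filter_eq_self.2 (fun y hy => by
        simp only [Bool.not_eq_eq_eq_not, Bool.not_true, beq_eq_false_iff_ne, ne_eq]
        exact fun h => hs (h ▸ hy))
    · simp [hx, ih hrest]

-- B's loop computes the accumulator followed by the symbol-fold of A.
theorem accessLoop_eq (l : List String) :
    ∀ (S : PySem.Set String), S.Nodup → ∀ (res : List String),
      accessLoop l S res = res ++ S.foldl (fun xs s => xs.erase s) l := by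
  induction l with
  | nil => intro S _ res; simp [accessLoop, foldl_erase_nil]
  | cons x t ih =>
    intro S hS res
    rw [foldl_erase_cons]
    by_cases hx : x ∈ S
    · have hc : PySem.Set.contains S x = true := (PySem.Set.contains_iff S x).2 hx
      rw [accessLoop, if_pos hc, discard_eq_erase S hS x, ih _ (hS.erase x) res, if_pos hx]
    · have hc : ¬ PySem.Set.contains S x = true := fun h => hx ((PySem.Set.contains_iff S x).1 h)
      rw [accessLoop, if_neg hc, ih _ hS (res ++ [x]), if_neg hx]
      simp

-- ===== VERDICT (by name: the statement is the Claim_ definition above) =====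
theorem access_input_spec : Claim_equal_access_input := by
  intro input _
  unfold Spec_access_input access_input access_input_alt
  rw [accessLoop_eq _ (PySem.Set.ofList symbols) (PySem.Set.nodup_ofList symbols) []]
  have hofl : PySem.Set.ofList symbols = symbols := by decide
  rw [hofl, List.nil_append]
  exact PySem.List.foldl_congr_mem _ _ _ _ (fun acc s _ => removeStep_eq_erase acc s)
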